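-- pv_equiv track=rewrite | github.com/lopogamer/BeeCrowd_Solutions | Iniciante/1072.py | impar
-- ===== SOURCE A (Python) =====
-- def impar(x,y):
--     lista = []
--     while True:
--         if y <= 0:
--             break
--         if x % 2 != 0:
--             y -= 1
--             lista.append(x)
--         x += 1
--     return lista
-- ===== SOURCE B (Python) =====
-- def impar(x, y):
--     start = x if x % 2 != 0 else x + 1
--     return [start + 2 * i for i in range(y)]
-- ===== Notes on version B (the rewrite author's own statement) =====
-- stated objective: simpler
-- what changed: Replaces the increment-by-1 scan with its even-skipping modulo test by computing the first odd >= x and generating the answer directly as the arithmetic progression start + 2*i for i in range(y).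
import Mathlib
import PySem

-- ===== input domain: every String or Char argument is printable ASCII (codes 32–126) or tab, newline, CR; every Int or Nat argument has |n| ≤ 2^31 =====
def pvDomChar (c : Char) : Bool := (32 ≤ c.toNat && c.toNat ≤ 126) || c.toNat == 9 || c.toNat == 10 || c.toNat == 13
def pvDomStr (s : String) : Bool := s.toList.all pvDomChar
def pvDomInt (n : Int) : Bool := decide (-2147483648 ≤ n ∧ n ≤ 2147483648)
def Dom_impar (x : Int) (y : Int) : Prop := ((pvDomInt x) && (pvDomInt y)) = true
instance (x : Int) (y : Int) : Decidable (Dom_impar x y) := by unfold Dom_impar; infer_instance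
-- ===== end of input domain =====

-- B computes the first odd >= x and emits the arithmetic progression start + 2*i (i in range(y)), instead of A's step-by-1 scan with a parity test.

-- ===== PORT A =====
theorem pvMod2 (a : Int) : PySem.Int.mod a 2 = a % 2 :=
  PySem.Int.mod_eq_emod_of_pos (by norm_num)

def imparLoop (x : Int) (y : Int) (lista : List Int) : List Int :=
  if y ≤ 0 then lista
  else if PySem.Int.mod x 2 ≠ 0 then imparLoop (x + 1) (y - 1) (lista ++ [x])
  else imparLoop (x + 1) y lista
termination_by (2 * y + (if PySem.Int.mod x 2 = 0 then 1 else 0)).toNat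
decreasing_by
  · simp only [pvMod2] at *; split_ifs at * <;> omega
  · simp only [pvMod2] at *; split_ifs at * <;> omega

def impar (x : Int) (y : Int) : List Int := imparLoop x y []

-- ===== PORT B =====
def impar_alt (x : Int) (y : Int) : List Int :=
  let start := if PySem.Int.mod x 2 ≠ 0 then x else x + 1
  (PySem.List.pyRange 0 y 1).map (fun i => start + 2 * i)

-- ===== PRECONDITION & SPEC =====
def Spec_impar (x : Int) (y : Int) (out : List Int) : Prop := out = impar_alt x y
instance (x : Int) (y : Int) (out : List Int) : Decidable (Spec_impar x y out) := by unfold Spec_impar; infer_instance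

-- ===== CLAIM (what is proved, stated in full; the proofs are below) =====
def Claim_equal_impar : Prop := ∀ (x : Int) (y : Int), Dom_impar x y → Spec_impar x y (impar x y)

-- ===== LEMMAS AND PROOFS =====
def pvOdds (s : Int) : Nat → List Int
  | 0 => []
  | n + 1 => s :: pvOdds (s + 2) n

theorem pvOdds_eq_map (n : Nat) : ∀ (s : Int),
    pvOdds s n = (List.range n).map (fun k : Nat => s + 2 * (k : Int)) := by
  induction n with
  | zero => intro s; simp [pvOdds]
  | succ m ih =>
    intro s
    rw [List.range_succ_eq_map, List.map_cons, List.map_map]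
    simp only [pvOdds, ih]
    congr 1
    · omega
    · apply List.map_congr_left
      intro k _
      simp only [Function.comp]
      push_cast
      ring

theorem imparLoop_eq (n : Nat) : ∀ (x y : Int) (lista : List Int),
    2 * y + (if PySem.Int.mod x 2 = 0 then 1 else 0) ≤ (n : Int) →
    imparLoop x y lista =
      lista ++ pvOdds (if PySem.Int.mod x 2 ≠ 0 then x else x + 1) y.toNat := by
  induction n with
  | zero =>
    intro x y lista h
    have hy : y ≤ 0 := by split at h <;> omega
    rw [imparLoop]
    simp [hy, Int.toNat_of_nonpos hy, pvOdds]
  | succ m ih =>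
    intro x y lista h
    rw [imparLoop]
    by_cases hy : y ≤ 0
    · simp [hy, Int.toNat_of_nonpos hy, pvOdds]
    · simp only [hy, if_false]
      by_cases hodd : PySem.Int.mod x 2 ≠ 0
      · rw [if_pos hodd]
        rw [ih (x + 1) (y - 1) (lista ++ [x])
            (by simp only [pvMod2] at *; split_ifs at * <;> omega)]
        have hx : x % 2 = 1 := by simp only [pvMod2] at hodd; omega
        have hx1 : ¬ ((x + 1) % 2 ≠ 0) := by omega
        have hyn : y.toNat = (y - 1).toNat + 1 := by omega
        simp only [pvMod2, hx1, if_false, hyn, pvOdds]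
        norm_num [hx]
        congr 1
        ring
      · rw [if_neg hodd]
        rw [ih (x + 1) y lista
            (by simp only [pvMod2] at *; split_ifs at * <;> omega)]
        have hx : x % 2 = 0 := by simp only [pvMod2] at hodd; omega
        have hx1 : (x + 1) % 2 ≠ 0 := by omega
        simp [hx, hx1]

-- ===== VERDICT (by name: the statement is the Claim_ definition above) =====
theorem impar_spec : Claim_equal_impar := by
  unfold Claim_equal_impar
  intro x y _
  unfold Spec_impar impar impar_alt
  rw [imparLoop_eq (2 * y + 1).toNat x y [] (by split <;> omega)]
  rw [PySem.List.pyRange_one, pvOdds_eq_map, List.map_map]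
  simp only [List.nil_append, sub_zero]
  apply List.map_congr_left
  intro k _
  simp only [Function.comp]
  ring
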